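-- pv_equiv track=rewrite | github.com/joachimdekker/Advent-of-Code | 2015/day5.py | niceStringWalker2
-- ===== SOURCE A (Python) =====
-- def niceStringWalker2(string: str) -> bool:
--     pairOfLetters = False
--     repeatingElevation = False
--
--     for i in range(2, len(string)):
--         if string[i-2:i] in string[:i-2] + "_" + string[i:]:
--             pairOfLetters = True
--
--         if string[i-2] == string[i]:
--             repeatingElevation = True
--
--     return pairOfLetters and repeatingElevation
-- ===== SOURCE B (Python) =====
-- def niceStringWalker2(string: str) -> bool:
--     first = {}
--     pair_found = False
--     for i in range(len(string) - 1):
--         p = string[i:i+2]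
--         if p in first:
--             if first[p] <= i - 2:
--                 pair_found = True
--         else:
--             first[p] = i
--     repeat_found = False
--     for i in range(len(string) - 2):
--         if string[i] == string[i+2]:
--             repeat_found = True
--     return pair_found and repeat_found
-- ===== Notes on version B (the rewrite author's own statement) =====
-- stated objective: faster
-- what changed: Replaces the per-index substring search over freshly built sliced copies (quadratic) by one linear pass that records each 2-char pair's first occurrence in a dict and checks non-overlapping reoccurrence, plus a linear xyx scan.
-- intended difference: On strings where the underscore separator that A splices between prefix and suffix accidentally completes a pair match (as in the witness, whose second pair matches the prefix's last letter followed by the spliced separator) while no 2-char pair really occurs twice without overlapping, A returns True though no pair repeats; B returns False, the intended answer, since that match is an artefact of A's search-string construction. — e.g. on niceStringWalker2("aa_xyx"): A returns true, B returns false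
import Mathlib
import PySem

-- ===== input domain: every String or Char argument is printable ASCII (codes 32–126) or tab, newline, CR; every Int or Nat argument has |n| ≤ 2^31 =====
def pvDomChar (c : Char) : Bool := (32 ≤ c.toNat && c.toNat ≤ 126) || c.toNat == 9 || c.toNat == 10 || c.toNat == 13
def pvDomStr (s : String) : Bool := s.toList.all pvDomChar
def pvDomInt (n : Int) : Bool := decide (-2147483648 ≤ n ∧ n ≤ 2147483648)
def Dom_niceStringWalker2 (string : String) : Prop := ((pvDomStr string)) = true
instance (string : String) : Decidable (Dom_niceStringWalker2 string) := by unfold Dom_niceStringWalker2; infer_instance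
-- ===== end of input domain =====

-- B replaces A's quadratic per-index substring search over sliced copies by one linear pass
-- with a dict of each pair's first index plus a linear xyx scan (objective: faster).

-- ===== PORT A =====
def niceStringWalker2 (string : String) : Bool :=
  let l := string.toList
  let n : Int := l.length
  let st := (PySem.List.pyRange 2 n 1).foldl
    (fun (st : Bool × Bool) (i : Int) =>
      ((if PySem.Chars.isIn (PySem.List.slice l (some (i - 2)) (some i))
            (PySem.List.slice l none (some (i - 2)) ++ ['_'] ++ PySem.List.slice l (some i) none)
        then true else st.1),
       (if PySem.List.pyGet? l (i - 2) == PySem.List.pyGet? l i then true else st.2)))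
    (false, false)
  st.1 && st.2

-- ===== PORT B =====
def niceStringWalker2_alt (string : String) : Bool :=
  let l := string.toList
  let n : Int := l.length
  let st := (PySem.List.pyRange 0 (n - 1) 1).foldl
    (fun (st : PySem.Dict (List Char) Int × Bool) (i : Int) =>
      let p := PySem.List.slice l (some i) (some (i + 2))
      match st.1.get? p with
      | some v => (st.1, if v ≤ i - 2 then true else st.2)
      | none => (st.1.insert p i, st.2))
    (PySem.Dict.empty, false)
  let rep := (PySem.List.pyRange 0 (n - 2) 1).foldl
    (fun (r : Bool) (i : Int) =>
      if PySem.List.pyGet? l i == PySem.List.pyGet? l (i + 2) then true else r)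
    false
  st.2 && rep

-- ===== PRECONDITION & SPEC =====
-- On strings where the underscore separator A splices between prefix and suffix accidentally
-- completes a pair match (a window ccu not at the very end, or ucc anywhere, u the separator)
-- while no 2-char pair really occurs twice without overlapping (and a c?c repeat exists, so A's
-- other flag is set), A returns true though no pair repeats; B returns false, the intended
-- answer — that match is an artefact of A's search-string construction.
def D_niceStringWalker2 (string : String) : Prop :=
  let ps := string.toList.zip string.toList.tail
  let w := ps.zip (string.toList.drop 2)
  (∃ x ∈ w, x.1.1 = x.2) ∧
  ((∃ x ∈ w, x.1.1 = '_' ∧ x.1.2 = x.2) ∨ ∃ x ∈ w.dropLast, x.1.1 = x.1.2 ∧ x.2 = '_') ∧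
  ∀ x ∈ ps.zipIdx, x.1 ∉ ps.drop (x.2 + 2)
instance (string : String) : Decidable (D_niceStringWalker2 string) := by
  unfold D_niceStringWalker2; infer_instance

def Spec_niceStringWalker2 (string : String) (out : Bool) : Prop :=
  ¬ D_niceStringWalker2 string → out = niceStringWalker2_alt string
instance (string : String) (out : Bool) : Decidable (Spec_niceStringWalker2 string out) := by
  unfold Spec_niceStringWalker2; infer_instance

def pvDiffWitness_niceStringWalker2 : String := "aa_xyx"
def pvDiffWitnessOut_niceStringWalker2 : Bool × Bool := (true, false)

-- ===== CLAIM (what is proved, stated in full; the proofs are below) =====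
def Claim_unchanged_niceStringWalker2 : Prop := ∀ (string : String), Dom_niceStringWalker2 string → Spec_niceStringWalker2 string (niceStringWalker2 string)
def Claim_changed_niceStringWalker2 : Prop := Dom_niceStringWalker2 (pvDiffWitness_niceStringWalker2) ∧ D_niceStringWalker2 (pvDiffWitness_niceStringWalker2) ∧ niceStringWalker2 (pvDiffWitness_niceStringWalker2) = pvDiffWitnessOut_niceStringWalker2.1 ∧ niceStringWalker2_alt (pvDiffWitness_niceStringWalker2) = pvDiffWitnessOut_niceStringWalker2.2 ∧ pvDiffWitnessOut_niceStringWalker2.1 ≠ pvDiffWitnessOut_niceStringWalker2.2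
def Claim_exact_niceStringWalker2 : Prop := ∀ (string : String), Dom_niceStringWalker2 string → D_niceStringWalker2 string → niceStringWalker2 string ≠ niceStringWalker2_alt string

-- ===== LEMMAS AND PROOFS =====

-- proof-side names for the three components of D_ and the pair window
def pvPairAt (l : List Char) (j : Nat) : List Char := (l.drop j).take 2
def pvRepB (l : List Char) : Bool :=
  ((l.zip l.tail).zip (l.drop 2)).any fun x => x.1.1 == x.2
def pvCrossB (l : List Char) : Bool :=
  let w := (l.zip l.tail).zip (l.drop 2)
  (w.any fun x => x.1.1 == '_' && x.1.2 == x.2) || w.dropLast.any fun x => x.1.1 == x.1.2 && x.2 == '_'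
def pvGenuineB (l : List Char) : Bool :=
  (l.zip l.tail).zipIdx.any fun x => ((l.zip l.tail).drop (x.2 + 2)).contains x.1

theorem pvD_iff (s : String) :
    D_niceStringWalker2 s ↔
      (pvRepB s.toList = true ∧ pvCrossB s.toList = true ∧ pvGenuineB s.toList = false) := by
  simp only [D_niceStringWalker2, pvRepB, pvCrossB, pvGenuineB, List.any_eq_true,
    List.any_eq_false, Bool.or_eq_true, Bool.and_eq_true, beq_iff_eq,
    List.contains_iff_mem]

-- getElem? views of the zipped windows
theorem pvPs_get (l : List Char) (j : Nat) :
    (l.zip l.tail)[j]? = match l[j]?, l[j+1]? with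
      | some a, some b => some (a, b)
      | _, _ => none := by
  rw [List.zip_eq_zipWith, List.getElem?_zipWith, ← List.drop_one, List.getElem?_drop,
      Nat.add_comm 1 j]
  cases l[j]? <;> cases l[j+1]? <;> rfl

theorem pvW_get (l : List Char) (p : Nat) :
    ((l.zip l.tail).zip (l.drop 2))[p]? = match l[p]?, l[p+1]?, l[p+2]? with
      | some a, some b, some c => some ((a, b), c)
      | _, _, _ => none := by
  rw [List.zip_eq_zipWith, List.getElem?_zipWith, pvPs_get, List.getElem?_drop,
      Nat.add_comm 2 p]
  cases l[p]? <;> cases l[p+1]? <;> cases l[p+2]? <;> rfl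

theorem pvPs_some (l : List Char) (j : Nat) (pr : Char × Char) :
    (l.zip l.tail)[j]? = some pr ↔ (l[j]? = some pr.1 ∧ l[j+1]? = some pr.2) := by
  rw [pvPs_get]
  cases ha : l[j]? <;> cases hb : l[j+1]? <;> simp [Prod.ext_iff, eq_comm]

theorem pvW_mem (l : List Char) (x : (Char × Char) × Char) :
    x ∈ (l.zip l.tail).zip (l.drop 2) ↔
      ∃ p, l[p]? = some x.1.1 ∧ l[p+1]? = some x.1.2 ∧ l[p+2]? = some x.2 := by
  rw [List.mem_iff_getElem?]
  apply exists_congr; intro p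
  rw [pvW_get]
  cases ha : l[p]? <;> cases hb : l[p+1]? <;> cases hc : l[p+2]? <;>
    simp [Prod.ext_iff, eq_comm, and_assoc]

theorem pvWD_mem (l : List Char) (x : (Char × Char) × Char) :
    x ∈ ((l.zip l.tail).zip (l.drop 2)).dropLast ↔
      ∃ p, p + 3 < l.length ∧ l[p]? = some x.1.1 ∧ l[p+1]? = some x.1.2 ∧ l[p+2]? = some x.2 := by
  have hw : ((l.zip l.tail).zip (l.drop 2)).length = l.length - 2 := by
    simp [List.length_zip, List.length_drop, List.length_tail]; omega
  rw [List.mem_iff_getElem?]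
  apply exists_congr; intro p
  rw [List.getElem?_dropLast, hw]
  by_cases hp : p < l.length - 2 - 1
  · rw [if_pos hp, pvW_get]
    cases ha : l[p]? <;> cases hb : l[p+1]? <;> cases hc : l[p+2]? <;>
      simp [Prod.ext_iff, eq_comm, and_assoc, (by omega : p + 3 < l.length)]
  · rw [if_neg hp]
    constructor
    · intro h; simp at h
    · rintro ⟨h3, -, -, hc⟩
      omega

theorem pvPairAt_eq {l : List Char} {j : Nat} (h : j + 2 ≤ l.length) :
    pvPairAt l j = [l[j]'(by omega), l[j+1]'(by omega)] := by
  have h1 : j < l.length := by omega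
  have h2' : j + 1 < l.length := by omega
  apply List.ext_getElem?
  intro k
  match k with
  | 0 => simp [pvPairAt, h1]
  | 1 => simp [pvPairAt, List.getElem?_drop, h2']
  | (k+2) => simp [pvPairAt]

-- two pairs are equal iff their characters agree (Option form)
theorem pvPair_eq_iff (l : List Char) (j k : Nat) (hj : j + 2 ≤ l.length) (hk : k + 2 ≤ l.length) :
    pvPairAt l j = pvPairAt l k ↔ (l[j]? = l[k]? ∧ l[j+1]? = l[k+1]?) := by
  rw [pvPairAt_eq hj, pvPairAt_eq hk]
  rw [List.getElem?_eq_getElem (show j < l.length by omega),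
      List.getElem?_eq_getElem (show j + 1 < l.length by omega),
      List.getElem?_eq_getElem (show k < l.length by omega),
      List.getElem?_eq_getElem (show k + 1 < l.length by omega)]
  simp

-- Prop forms of the three spec predicates
theorem pvGenuineB_iff (l : List Char) :
    pvGenuineB l = true ↔ ∃ k, k + 2 ≤ l.length ∧ ∃ j, j + 2 ≤ k ∧ pvPairAt l j = pvPairAt l k := by
  simp only [pvGenuineB, List.any_eq_true]
  constructor
  · rintro ⟨x, hx, hp⟩
    obtain ⟨j, hj⟩ := List.mem_iff_getElem?.mp hx
    rw [List.getElem?_zipIdx] at hj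
    cases hps : (l.zip l.tail)[j]? with
    | none => rw [hps] at hj; simp at hj
    | some pr =>
      rw [hps] at hj
      simp only [Option.map_some, Option.some.injEq, Nat.zero_add] at hj
      obtain ⟨h0, h1⟩ := (pvPs_some l j pr).mp hps
      have hx1 : x.1 = pr := by rw [← hj]
      have hx2 : x.2 = j := by rw [← hj]
      rw [hx1, hx2] at hp
      obtain ⟨m, hm⟩ := List.mem_iff_getElem?.mp (List.contains_iff_mem.mp hp)
      rw [List.getElem?_drop] at hm
      obtain ⟨hk0, hk1⟩ := (pvPs_some l (j + 2 + m) pr).mp hm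
      have hjb : j + 1 < l.length := (List.getElem?_eq_some_iff.mp h1).1
      have hkb : j + 2 + m + 1 < l.length := (List.getElem?_eq_some_iff.mp hk1).1
      refine ⟨j + 2 + m, by omega, j, by omega, ?_⟩
      refine (pvPair_eq_iff l j (j + 2 + m) (by omega) (by omega)).mpr ⟨?_, ?_⟩
      · rw [h0, hk0]
      · rw [h1, hk1]
  · rintro ⟨k, hk, j, hjk, heq⟩
    obtain ⟨h0, h1⟩ := (pvPair_eq_iff l j k (by omega) hk).mp heq
    have haj := List.getElem?_eq_getElem (show j < l.length by omega)
    have haj1 := List.getElem?_eq_getElem (show j + 1 < l.length by omega)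
    have hps : (l.zip l.tail)[j]? = some (l[j]'(by omega), l[j+1]'(by omega)) :=
      (pvPs_some l j _).mpr ⟨haj, haj1⟩
    refine ⟨((l[j]'(by omega), l[j+1]'(by omega)), j), ?_, ?_⟩
    · apply List.mem_iff_getElem?.mpr ⟨j, ?_⟩
      rw [List.getElem?_zipIdx, hps]
      simp
    · apply List.contains_iff_mem.mpr
      apply List.mem_iff_getElem?.mpr ⟨k - (j + 2), ?_⟩
      rw [List.getElem?_drop, show j + 2 + (k - (j + 2)) = k by omega]
      apply (pvPs_some l k _).mpr
      constructor
      · rw [← h0, haj]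
      · rw [← h1, haj1]

theorem pvRepB_iff (l : List Char) :
    pvRepB l = true ↔ ∃ i, i + 3 ≤ l.length ∧ l[i]? = l[i+2]? := by
  simp only [pvRepB, List.any_eq_true]
  constructor
  · rintro ⟨x, hx, hp⟩
    obtain ⟨p, h0, h1, h2⟩ := (pvW_mem l x).mp hx
    have hb : p + 2 < l.length := (List.getElem?_eq_some_iff.mp h2).1
    refine ⟨p, by omega, ?_⟩
    rw [h0, h2]
    exact congrArg some (beq_iff_eq.mp hp)
  · rintro ⟨i, hlen, he⟩
    refine ⟨((l[i]'(by omega), l[i+1]'(by omega)), l[i+2]'(by omega)), ?_, ?_⟩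
    · refine (pvW_mem l _).mpr ⟨i, ?_, ?_, ?_⟩ <;> exact List.getElem?_eq_getElem (by omega)
    · have h2 := he
      rw [List.getElem?_eq_getElem (show i < l.length by omega),
          List.getElem?_eq_getElem (show i + 2 < l.length by omega)] at h2
      simpa using h2

theorem pvCrossB_iff (l : List Char) :
    pvCrossB l = true ↔ ∃ i, 2 ≤ i ∧ i < l.length ∧
      ((3 ≤ i ∧ l[i-3]? = l[i-2]? ∧ l[i-1]? = some '_') ∨
       (l[i-2]? = some '_' ∧ l[i-1]? = l[i]?)) := by
  simp only [pvCrossB, Bool.or_eq_true, List.any_eq_true]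
  constructor
  · rintro (⟨x, hx, hp⟩ | ⟨x, hx, hp⟩)
    · obtain ⟨q, h0, h1, h2⟩ := (pvW_mem l x).mp hx
      simp only [Bool.and_eq_true, beq_iff_eq] at hp
      obtain ⟨hp1, hp2⟩ := hp
      have hq2 : q + 2 < l.length := (List.getElem?_eq_some_iff.mp h2).1
      refine ⟨q + 2, by omega, by omega, Or.inr ⟨?_, ?_⟩⟩
      · rw [show q + 2 - 2 = q by omega, h0, hp1]
      · rw [show q + 2 - 1 = q + 1 by omega, h1, h2, hp2]
    · obtain ⟨q, hq3, h0, h1, h2⟩ := (pvWD_mem l x).mp hx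
      simp only [Bool.and_eq_true, beq_iff_eq] at hp
      obtain ⟨hp1, hp2⟩ := hp
      refine ⟨q + 3, by omega, by omega, Or.inl ⟨by omega, ?_, ?_⟩⟩
      · rw [show q + 3 - 3 = q by omega, show q + 3 - 2 = q + 1 by omega, h0, h1, hp1]
      · rw [show q + 3 - 1 = q + 2 by omega, h2, hp2]
  · rintro ⟨i, h2i, hil, (⟨h3i, ha, hb⟩ | ⟨ha, hb⟩)⟩
    · right
      have e3 := List.getElem?_eq_getElem (show i - 3 < l.length by omega)
      have e2 := List.getElem?_eq_getElem (show i - 2 < l.length by omega)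
      have e1 := List.getElem?_eq_getElem (show i - 1 < l.length by omega)
      refine ⟨((l[i-3]'(by omega), l[i-2]'(by omega)), l[i-1]'(by omega)), ?_, ?_⟩
      · apply (pvWD_mem l _).mpr
        refine ⟨i - 3, by omega, ?_, ?_, ?_⟩
        · exact e3
        · rw [show i - 3 + 1 = i - 2 by omega]; exact e2
        · rw [show i - 3 + 2 = i - 1 by omega]; exact e1
      · simp only [Bool.and_eq_true, beq_iff_eq]
        constructor
        · have := ha; rw [e3, e2] at this; simpa using this
        · have := hb; rw [e1] at this; simpa using this
    · left
      have e2 := List.getElem?_eq_getElem (show i - 2 < l.length by omega)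
      have e1 := List.getElem?_eq_getElem (show i - 1 < l.length by omega)
      have e0 := List.getElem?_eq_getElem (show i < l.length by omega)
      refine ⟨((l[i-2]'(by omega), l[i-1]'(by omega)), l[i]'(by omega)), ?_, ?_⟩
      · apply (pvW_mem l _).mpr
        refine ⟨i - 2, ?_, ?_, ?_⟩
        · exact e2
        · rw [show i - 2 + 1 = i - 1 by omega]; exact e1
        · rw [show i - 2 + 2 = i by omega]; exact e0
      · simp only [Bool.and_eq_true, beq_iff_eq]
        constructor
        · have := ha; rw [e2] at this; simpa using this
        · have := hb; rw [e1, e0] at this; simpa using this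

-- a fold that only or-updates two flags computes List.any componentwise
theorem pvFoldFlags (f g : Int → Bool) (xs : List Int) (a b : Bool) :
    xs.foldl (fun (st : Bool × Bool) i =>
        ((if f i then true else st.1), (if g i then true else st.2))) (a, b)
      = (a || xs.any f, b || xs.any g) := by
  induction xs generalizing a b with
  | nil => simp
  | cons x xs ih =>
    simp only [List.foldl_cons, List.any_cons, ih]
    cases f x <;> cases g x <;> simp

theorem pvFoldFlag (g : Int → Bool) (xs : List Int) (b : Bool) :
    xs.foldl (fun (r : Bool) i => if g i then true else r) b = (b || xs.any g) := by
  induction xs generalizing b with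
  | nil => simp
  | cons x xs ih =>
    simp only [List.foldl_cons, List.any_cons]
    rw [ih]
    cases g x <;> cases b <;> simp

-- a 2-element list is an infix iff its two characters appear consecutively
theorem pvIsIn_pair (a b : Char) (t : List Char) :
    PySem.Chars.isIn [a, b] t = true ↔ ∃ j : Nat, t[j]? = some a ∧ t[j+1]? = some b := by
  rw [← PySem.Chars.exists_prefix_drop_iff_isIn]
  apply exists_congr; intro j
  have h0 : (t.drop j)[0]? = t[j]? := by rw [List.getElem?_drop]; norm_num
  have h1 : (t.drop j)[1]? = t[j+1]? := by rw [List.getElem?_drop]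
  rw [← h0, ← h1]
  cases hu : t.drop j with
  | nil => simp
  | cons x u' =>
    cases u' with
    | nil => simp [List.cons_prefix_cons, eq_comm]
    | cons y u'' => simp [List.cons_prefix_cons, eq_comm]

-- the characters of A's search string  take (m-2) ++ '_' :: drop m
theorem pvSearchGet (l : List Char) (m : Nat) (h2 : 2 ≤ m) (hm : m ≤ l.length) (j : Nat) :
    (l.take (m-2) ++ '_' :: l.drop m)[j]? =
      if j < m - 2 then l[j]? else if j = m - 2 then some '_' else l[j+1]? := by
  have hlen : (l.take (m-2)).length = m - 2 := by
    simp [List.length_take]; omega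
  by_cases hj : j < m - 2
  · rw [List.getElem?_append_left (by omega), List.getElem?_take_of_lt hj]
    simp [hj]
  · rw [List.getElem?_append_right (by omega), hlen]
    by_cases he : j = m - 2
    · simp [he]
    · have h1 : j - (m-2) = (j - (m-1)) + 1 := by omega
      rw [h1]
      simp only [List.getElem?_cons_succ, List.getElem?_drop]
      have h2' : m + (j - (m-1)) = j + 1 := by omega
      rw [h2']
      simp [hj, he]

-- A's pair condition over the whole loop equals "genuine pair or cross artefact"
theorem pvCondA (l : List Char) :
    (∃ i : Int, 2 ≤ i ∧ i < (l.length : Int) ∧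
        PySem.Chars.isIn (PySem.List.slice l (some (i - 2)) (some i))
          (PySem.List.slice l none (some (i - 2)) ++ ['_'] ++ PySem.List.slice l (some i) none) = true)
      ↔ (pvGenuineB l || pvCrossB l) = true := by
  rw [Bool.or_eq_true, pvGenuineB_iff, pvCrossB_iff]
  have key : ∀ m : Nat, 2 ≤ m → m < l.length →
      (PySem.Chars.isIn (PySem.List.slice l (some ((m : Int) - 2)) (some (m : Int)))
        (PySem.List.slice l none (some ((m : Int) - 2)) ++ ['_'] ++
          PySem.List.slice l (some (m : Int)) none) = true
      ↔ ∃ j : Nat, (l.take (m-2) ++ '_' :: l.drop m)[j]? = l[m-2]? ∧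
          (l.take (m-2) ++ '_' :: l.drop m)[j+1]? = l[m-2+1]?) := by
    intro m h2m hmlen
    have hc : (m : Int) - 2 = ((m - 2 : Nat) : Int) := by omega
    have e1 : PySem.List.slice l (some ((m : Int) - 2)) (some (m : Int)) = pvPairAt l (m - 2) := by
      rw [hc, PySem.List.slice_natCast]
      have h22 : m - (m - 2) = 2 := by omega
      rw [h22]; rfl
    have e2 : PySem.List.slice l none (some ((m : Int) - 2)) = l.take (m - 2) := by
      rw [hc, PySem.List.slice_to_natCast]
    have e3 : PySem.List.slice l (some (m : Int)) none = l.drop m := by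
      rw [PySem.List.slice_from_natCast]
    have hsh : l.take (m-2) ++ ['_'] ++ l.drop m = l.take (m-2) ++ '_' :: l.drop m := by
      simp
    have hb2 : m - 2 + 2 ≤ l.length := by omega
    rw [e1, e2, e3, hsh, pvPairAt_eq hb2, pvIsIn_pair]
    rw [List.getElem?_eq_getElem (show m - 2 < l.length by omega),
        List.getElem?_eq_getElem (show m - 2 + 1 < l.length by omega)]
  constructor
  · rintro ⟨i, h2, hlt, hin⟩
    obtain ⟨m, rfl⟩ : ∃ m : Nat, i = (m : Int) := ⟨i.toNat, (Int.toNat_of_nonneg (by omega)).symm⟩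
    have h2m : 2 ≤ m := by exact_mod_cast h2
    have hmlen : m < l.length := by exact_mod_cast hlt
    rw [key m h2m hmlen] at hin
    obtain ⟨j, hj0, hj1⟩ := hin
    rw [pvSearchGet l m h2m (le_of_lt hmlen) j] at hj0
    rw [pvSearchGet l m h2m (le_of_lt hmlen) (j+1)] at hj1
    by_cases c0 : j < m - 2
    · rw [if_pos c0] at hj0
      by_cases c1 : j + 1 < m - 2
      · -- both inside the prefix: genuine pair (j, m-2)
        rw [if_pos c1] at hj1
        refine Or.inl ⟨m - 2, by omega, j, by omega, ?_⟩
        exact (pvPair_eq_iff l j (m-2) (by omega) (by omega)).mpr ⟨hj0, hj1⟩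
      · -- j = m-3 : prefix last char + the spliced separator — cross, form 1
        have hj3 : j + 1 = m - 2 := by omega
        rw [if_neg c1, if_pos hj3] at hj1
        refine Or.inr ⟨m, h2m, hmlen, Or.inl ⟨by omega, ?_, ?_⟩⟩
        · rw [show m - 3 = j by omega]; exact hj0
        · rw [show m - 1 = m - 2 + 1 by omega]; exact hj1.symm
    · by_cases ce : j = m - 2
      · -- the spliced separator + first suffix char — cross, form 2
        rw [if_neg c0, if_pos ce] at hj0
        rw [if_neg (show ¬ (j + 1 < m - 2) by omega),
            if_neg (show ¬ (j + 1 = m - 2) by omega)] at hj1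
        rw [show j + 1 + 1 = m by omega] at hj1
        refine Or.inr ⟨m, h2m, hmlen, Or.inr ⟨hj0.symm, ?_⟩⟩
        rw [show m - 1 = m - 2 + 1 by omega]; exact hj1.symm
      · -- both inside the suffix: genuine pair (m-2, j+1)
        rw [if_neg c0, if_neg ce] at hj0
        rw [if_neg (show ¬ (j + 1 < m - 2) by omega),
            if_neg (show ¬ (j + 1 = m - 2) by omega)] at hj1
        have hs : (l[j+1+1]?).isSome := by
          rw [hj1, List.getElem?_eq_getElem (show m - 2 + 1 < l.length by omega)]
          simp
        have hlen2 : j + 1 + 1 < l.length := by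
          by_contra hcon
          rw [List.getElem?_eq_none (by omega)] at hs
          simp at hs
        refine Or.inl ⟨j + 1, by omega, m - 2, by omega, ?_⟩
        exact (pvPair_eq_iff l (m-2) (j+1) (by omega) (by omega)).mpr ⟨hj0.symm, hj1.symm⟩
  · rintro (⟨k, hk, j, hjk, heq⟩ | ⟨m, h2m, hmlen, hcross⟩)
    · -- genuine pair (j, k): take i = j+2, match at position k-1
      obtain ⟨he0, he1⟩ := (pvPair_eq_iff l j k (by omega) hk).mp heq
      refine ⟨((j + 2 : Nat) : Int), by omega, by exact_mod_cast (by omega : j + 2 < l.length), ?_⟩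
      rw [key (j + 2) (by omega) (by omega)]
      refine ⟨k - 1, ?_, ?_⟩
      · rw [pvSearchGet l (j+2) (by omega) (by omega) (k-1)]
        rw [if_neg (show ¬ (k - 1 < j + 2 - 2) by omega),
            if_neg (show ¬ (k - 1 = j + 2 - 2) by omega)]
        rw [show k - 1 + 1 = k by omega, show j + 2 - 2 = j by omega]
        exact he0.symm
      · rw [pvSearchGet l (j+2) (by omega) (by omega) (k-1+1)]
        rw [if_neg (show ¬ (k - 1 + 1 < j + 2 - 2) by omega),
            if_neg (show ¬ (k - 1 + 1 = j + 2 - 2) by omega)]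
        rw [show k - 1 + 1 + 1 = k + 1 by omega, show j + 2 - 2 + 1 = j + 1 by omega]
        exact he1.symm
    · refine ⟨((m : Nat) : Int), by omega, by exact_mod_cast hmlen, ?_⟩
      rw [key m h2m hmlen]
      rcases hcross with ⟨h3m, ha, hb⟩ | ⟨ha, hb⟩
      · -- form 1: position m-3 matches prefix-last + separator
        refine ⟨m - 3, ?_, ?_⟩
        · rw [pvSearchGet l m h2m (le_of_lt hmlen) (m-3)]
          rw [if_pos (show m - 3 < m - 2 by omega)]
          exact ha
        · rw [pvSearchGet l m h2m (le_of_lt hmlen) (m-3+1)]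
          rw [if_neg (show ¬ (m - 3 + 1 < m - 2) by omega),
              if_pos (show m - 3 + 1 = m - 2 by omega)]
          rw [show m - 2 + 1 = m - 1 by omega]
          exact hb.symm
      · -- form 2: position m-2 matches separator + suffix-first
        refine ⟨m - 2, ?_, ?_⟩
        · rw [pvSearchGet l m h2m (le_of_lt hmlen) (m-2)]
          rw [if_neg (show ¬ (m - 2 < m - 2) by omega), if_pos rfl]
          exact ha.symm
        · rw [pvSearchGet l m h2m (le_of_lt hmlen) (m-2+1)]
          rw [if_neg (show ¬ (m - 2 + 1 < m - 2) by omega),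
              if_neg (show ¬ (m - 2 + 1 = m - 2) by omega)]
          rw [show m - 2 + 1 + 1 = m by omega, show m - 2 + 1 = m - 1 by omega]
          exact hb.symm

theorem pvCondRepA (l : List Char) :
    (∃ i : Int, 2 ≤ i ∧ i < (l.length : Int) ∧
        (PySem.List.pyGet? l (i - 2) == PySem.List.pyGet? l i) = true) ↔ pvRepB l = true := by
  rw [pvRepB_iff]
  constructor
  · rintro ⟨i, h2, hlt, hbeq⟩
    obtain ⟨m, rfl⟩ : ∃ m : Nat, i = (m : Int) := ⟨i.toNat, (Int.toNat_of_nonneg (by omega)).symm⟩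
    have h2m : 2 ≤ m := by exact_mod_cast h2
    have hmlen : m < l.length := by exact_mod_cast hlt
    have hc : (m : Int) - 2 = ((m - 2 : Nat) : Int) := by omega
    rw [hc, PySem.List.pyGet?_natCast, PySem.List.pyGet?_natCast, beq_iff_eq] at hbeq
    refine ⟨m - 2, by omega, ?_⟩
    have hc2 : m - 2 + 2 = m := by omega
    rw [hc2]; exact hbeq
  · rintro ⟨i, hi, he⟩
    refine ⟨(i : Int) + 2, by omega, by exact_mod_cast (by omega : i + 2 < l.length), ?_⟩
    have hc : (i : Int) + 2 - 2 = ((i : Nat) : Int) := by omega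
    have hc2 : (i : Int) + 2 = ((i + 2 : Nat) : Int) := by omega
    rw [hc, hc2, PySem.List.pyGet?_natCast, PySem.List.pyGet?_natCast, beq_iff_eq]
    exact he

theorem pvA_char (s : String) :
    niceStringWalker2 s = ((pvGenuineB s.toList || pvCrossB s.toList) && pvRepB s.toList) := by
  simp only [niceStringWalker2]
  rw [pvFoldFlags]
  have h1 : (PySem.List.pyRange 2 (s.toList.length : Int) 1).any
      (fun i => PySem.Chars.isIn (PySem.List.slice s.toList (some (i - 2)) (some i))
        (PySem.List.slice s.toList none (some (i - 2)) ++ ['_'] ++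
          PySem.List.slice s.toList (some i) none))
      = (pvGenuineB s.toList || pvCrossB s.toList) := by
    rw [Bool.eq_iff_iff]
    simp only [List.any_eq_true, PySem.List.mem_pyRange_one]
    rw [← pvCondA s.toList]
    constructor
    · rintro ⟨i, ⟨hl, hr⟩, hc⟩; exact ⟨i, hl, hr, hc⟩
    · rintro ⟨i, hl, hr, hc⟩; exact ⟨i, ⟨hl, hr⟩, hc⟩
  have h2 : (PySem.List.pyRange 2 (s.toList.length : Int) 1).any
      (fun i => PySem.List.pyGet? s.toList (i - 2) == PySem.List.pyGet? s.toList i)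
      = pvRepB s.toList := by
    rw [Bool.eq_iff_iff]
    simp only [List.any_eq_true, PySem.List.mem_pyRange_one]
    rw [← pvCondRepA s.toList]
    constructor
    · rintro ⟨i, ⟨hl, hr⟩, hc⟩; exact ⟨i, hl, hr, hc⟩
    · rintro ⟨i, hl, hr, hc⟩; exact ⟨i, ⟨hl, hr⟩, hc⟩
  rw [h1, h2]
  simp

-- find? over range returns the least satisfying index
theorem pvFind?_range_min {p : Nat → Bool} {n j0 : Nat}
    (h : (List.range n).find? p = some j0) : ∀ j < j0, p j = false := by
  induction n with
  | zero => simp at h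
  | succ n ih =>
    rw [List.range_succ, List.find?_append] at h
    cases hf : (List.range n).find? p with
    | some j1 =>
      rw [hf] at h; simp at h; subst h; exact ih hf
    | none =>
      rw [hf] at h; simp at h
      intro j hj
      have := List.find?_eq_none.mp hf j (by simp; omega)
      simpa using this

-- invariant of B's dict pass
theorem pvDictInv (l : List Char) (t : Nat) :
    ∃ d : PySem.Dict (List Char) Int,
      (PySem.List.pyRange 0 (t : Int) 1).foldl
        (fun (st : PySem.Dict (List Char) Int × Bool) (i : Int) =>
          let p := PySem.List.slice l (some i) (some (i + 2))
          match st.1.get? p with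
          | some v => (st.1, if v ≤ i - 2 then true else st.2)
          | none => (st.1.insert p i, st.2))
        (PySem.Dict.empty, false)
      = (d, (List.range t).any (fun k => (List.range k).any
              (fun j => decide (j + 2 ≤ k) && (pvPairAt l j == pvPairAt l k))))
      ∧ ∀ p, d.get? p = ((List.range t).find? (fun j => pvPairAt l j == p)).map (fun j => (j : Int)) := by
  induction t with
  | zero =>
    refine ⟨PySem.Dict.empty, ?_, ?_⟩
    · rw [PySem.List.pyRange_one_eq_nil (by omega)]
      simp
    · intro p
      simp [PySem.Dict.get?_empty]
  | succ t ih =>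
    obtain ⟨d, hfold, hget⟩ := ih
    have hsplit : PySem.List.pyRange 0 ((t + 1 : Nat) : Int) 1
        = PySem.List.pyRange 0 (t : Int) 1 ++ [(t : Int)] := by
      rw [show ((t + 1 : Nat) : Int) = (t : Int) + 1 by push_cast; ring]
      exact PySem.List.pyRange_one_succ_right (by omega)
    have hp : PySem.List.slice l (some (t : Int)) (some ((t : Int) + 2)) = pvPairAt l t := by
      rw [show ((t : Int) + 2) = ((t + 2 : Nat) : Int) by push_cast; ring,
          PySem.List.slice_natCast, show t + 2 - t = 2 by omega]
      rfl
    rw [hsplit, List.foldl_append, hfold]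
    simp only [List.foldl_cons, List.foldl_nil, hp, hget (pvPairAt l t)]
    cases hfind : (List.range t).find? (fun j => pvPairAt l j == pvPairAt l t) with
    | none =>
      have hnone : ∀ j < t, ¬ pvPairAt l j = pvPairAt l t := by
        intro j hj hcon
        have := List.find?_eq_none.mp hfind j (by simpa using hj)
        simp [hcon] at this
      simp only [Option.bind_eq_bind, Option.bind_none, Option.map_none]
      refine ⟨d.insert (pvPairAt l t) (t : Int), ?_, ?_⟩
      · congr 1
        rw [List.range_succ, List.any_append]
        have hFt : (List.range t).any
            (fun j => decide (j + 2 ≤ t) && (pvPairAt l j == pvPairAt l t)) = false := by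
          rw [List.any_eq_false]
          intro j hj
          simp only [List.mem_range] at hj
          simp [hnone j hj]
        simp [hFt]
      · intro p
        rw [List.range_succ, List.find?_append, PySem.Dict.get?_insert]
        by_cases hpe : p = pvPairAt l t
        · subst hpe
          rw [hfind]
          simp
        · have hne : (pvPairAt l t == p) = false := by
            simp [Ne.symm hpe]
          cases hfp : (List.range t).find? (fun j => pvPairAt l j == p) <;>
            simp [hpe, hne, hfp, hget p]
    | some j0 =>
      have hj0t : j0 < t := by
        have := List.mem_range.mp (List.mem_of_find?_eq_some hfind)
        exact this
      have hj0p : pvPairAt l j0 = pvPairAt l t := by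
        have := List.find?_some hfind
        simpa using this
      have hmin := pvFind?_range_min hfind
      simp only [Option.bind_eq_bind, Option.bind_some, Option.pure_def, Option.map_some]
      refine ⟨d, ?_, ?_⟩
      · congr 1
        rw [List.range_succ, List.any_append]
        by_cases hle : j0 + 2 ≤ t
        · have : ((j0 : Int) ≤ (t : Int) - 2) := by omega
          rw [if_pos this]
          have hFt : (List.range t).any
              (fun j => decide (j + 2 ≤ t) && (pvPairAt l j == pvPairAt l t)) = true := by
            rw [List.any_eq_true]
            exact ⟨j0, List.mem_range.mpr hj0t, by simp [hle, hj0p]⟩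
          simp [hFt]
        · have : ¬ ((j0 : Int) ≤ (t : Int) - 2) := by omega
          rw [if_neg this]
          have hFt : (List.range t).any
              (fun j => decide (j + 2 ≤ t) && (pvPairAt l j == pvPairAt l t)) = false := by
            rw [List.any_eq_false]
            intro j hj
            simp only [List.mem_range] at hj
            by_cases hj2 : j + 2 ≤ t
            · by_cases hjj : pvPairAt l j = pvPairAt l t
              · rcases Nat.lt_or_ge j j0 with hlt | hge
                · have := hmin j hlt
                  simp [hjj] at this
                · omega
              · simp [hjj]
            · simp [hj2]
          simp [hFt]
      · intro p
        rw [List.range_succ, List.find?_append, hget p]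
        cases hfp : (List.range t).find? (fun j => pvPairAt l j == p) with
        | some x => simp
        | none =>
          have hpe : ¬ (pvPairAt l t = p) := by
            intro hcon
            rw [← hcon, hfind] at hfp
            simp at hfp
          have hne : (pvPairAt l t == p) = false := by simp [hpe]
          simp [hne]

theorem pvB_char (s : String) :
    niceStringWalker2_alt s = (pvGenuineB s.toList && pvRepB s.toList) := by
  simp only [niceStringWalker2_alt]
  set l := s.toList with hl
  set N := l.length with hN
  have hcast : PySem.List.pyRange 0 ((N : Int) - 1) 1
      = PySem.List.pyRange 0 ((N - 1 : Nat) : Int) 1 := by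
    cases N with
    | zero =>
      rw [PySem.List.pyRange_one_eq_nil (by omega), PySem.List.pyRange_one_eq_nil (by omega)]
    | succ n => congr 1; push_cast; omega
  obtain ⟨d, hfold, -⟩ := pvDictInv l (N - 1)
  rw [hcast, hfold, pvFoldFlag]
  have h1 : (List.range (N - 1)).any (fun k => (List.range k).any
        (fun j => decide (j + 2 ≤ k) && (pvPairAt l j == pvPairAt l k))) = pvGenuineB l := by
    rw [Bool.eq_iff_iff, pvGenuineB_iff]
    simp only [List.any_eq_true, List.mem_range, Bool.and_eq_true, decide_eq_true_eq, beq_iff_eq]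
    constructor
    · rintro ⟨k, hk, j, hj, hj2, he⟩
      exact ⟨k, by omega, j, hj2, he⟩
    · rintro ⟨k, hk, j, hj2, he⟩
      exact ⟨k, by omega, j, by omega, hj2, he⟩
  have h2 : (PySem.List.pyRange 0 ((N : Int) - 2) 1).any
      (fun i => PySem.List.pyGet? l i == PySem.List.pyGet? l (i + 2)) = pvRepB l := by
    rw [Bool.eq_iff_iff, pvRepB_iff]
    simp only [List.any_eq_true, PySem.List.mem_pyRange_one]
    constructor
    · rintro ⟨i, ⟨h0, hi⟩, hbeq⟩
      obtain ⟨m, rfl⟩ : ∃ m : Nat, i = (m : Int) := ⟨i.toNat, (Int.toNat_of_nonneg h0).symm⟩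
      rw [show (m : Int) + 2 = ((m + 2 : Nat) : Int) by push_cast; ring,
          PySem.List.pyGet?_natCast, PySem.List.pyGet?_natCast, beq_iff_eq] at hbeq
      exact ⟨m, by omega, hbeq⟩
    · rintro ⟨i, hi, he⟩
      refine ⟨(i : Int), ⟨by omega, by omega⟩, ?_⟩
      rw [show (i : Int) + 2 = ((i + 2 : Nat) : Int) by push_cast; ring,
          PySem.List.pyGet?_natCast, PySem.List.pyGet?_natCast, beq_iff_eq]
      exact he
  rw [h2]
  simp [h1]

-- ===== VERDICT (by name: the statement is the Claim_ definition above) =====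
theorem niceStringWalker2_spec : Claim_unchanged_niceStringWalker2 := by
  intro s _ hD
  rw [pvD_iff] at hD
  rw [pvA_char, pvB_char]
  rcases hG : pvGenuineB s.toList <;> rcases hC : pvCrossB s.toList <;>
    rcases hR : pvRepB s.toList <;> simp_all

theorem niceStringWalker2_changed : Claim_changed_niceStringWalker2 := by
  unfold Claim_changed_niceStringWalker2; decide

theorem niceStringWalker2_tight : Claim_exact_niceStringWalker2 := by
  intro s _ hD
  obtain ⟨hR, hC, hG⟩ := (pvD_iff s).mp hD
  rw [pvA_char, pvB_char, hR, hC, hG]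
  simp
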